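-- pv_equiv track=rewrite | github.com/samba-team/samba | python/samba/samba3/__init__.py | shellsplit
-- ===== SOURCE A (Python) =====
-- def shellsplit(text):
--     """Very simple shell-like line splitting.
--
--     :param text: Text to split.
--     :return: List with parts of the line as strings.
--     """
--     ret = list()
--     inquotes = False
--     current = ""
--     for c in text:
--         if c == "\"":
--             inquotes = not inquotes
--         elif c in ("\t", "\n", " ") and not inquotes:
--             if current != "":
--                 ret.append(current)
--             current = ""
--         else:
--             current += c
--     if current != "":
--         ret.append(current)
--     return ret
-- ===== SOURCE B (Python) =====
-- def shellsplit(text):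
--     """Very simple shell-like line splitting.
--
--     :param text: Text to split.
--     :return: List with parts of the line as strings.
--     """
--     ret = []
--     current = ""
--     inside = False
--     for part in text.split('"'):
--         if inside:
--             current += part
--         else:
--             pieces = part.replace("\t", " ").replace("\n", " ").split(" ")
--             current += pieces[0]
--             for piece in pieces[1:]:
--                 if current != "":
--                     ret.append(current)
--                 current = piece
--         inside = not inside
--     if current != "":
--         ret.append(current)
--     return ret
-- ===== Notes on version B (the rewrite author's own statement) =====
-- stated objective: faster
-- what changed: Replaces A's per-character quote/whitespace state machine by splitting on the quote character (odd-indexed parts are inside quotes), splitting the outside parts on space/tab/newline via str.replace/str.split, and regrouping the pieces into tokens across quote boundaries.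
import Mathlib
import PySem

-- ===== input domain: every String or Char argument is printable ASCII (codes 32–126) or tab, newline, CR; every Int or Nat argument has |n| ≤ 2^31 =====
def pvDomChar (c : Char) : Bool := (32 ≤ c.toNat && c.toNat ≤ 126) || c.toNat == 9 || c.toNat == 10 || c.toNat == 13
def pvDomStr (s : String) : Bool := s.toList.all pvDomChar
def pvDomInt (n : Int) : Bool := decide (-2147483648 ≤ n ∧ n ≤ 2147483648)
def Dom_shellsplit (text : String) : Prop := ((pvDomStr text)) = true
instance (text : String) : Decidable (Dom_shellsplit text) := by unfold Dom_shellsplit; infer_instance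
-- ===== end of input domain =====

-- B replaces A's per-character quote/space state machine by split-on-'"' then split-on-separators
-- regrouping (objective: measurably faster by a constant factor — bulk C-level str.split/replace
-- instead of a Python per-character loop).

-- ===== PORT A =====
-- state (ret, inquotes, current); current kept as List Char, turned into a String exactly when appended
def shellsplitStep : (List String × Bool × List Char) → Char → List String × Bool × List Char
  | (ret, inq, cur), c =>
    if c = '"' then (ret, !inq, cur)
    else if (c = '\t' ∨ c = '\n' ∨ c = ' ') ∧ inq = false then
      ((if cur ≠ [] then ret ++ [String.ofList cur] else ret), inq, [])
    else (ret, inq, cur ++ [c])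

def shellsplit (text : String) : List String :=
  let st := text.toList.foldl shellsplitStep ([], false, [])
  if st.2.2 ≠ [] then st.1 ++ [String.ofList st.2.2] else st.1

-- ===== PORT B =====
-- exact hand port of Python str.split(sep) for a one-character separator (keeps empty pieces)
def pySplit1 (sep : Char) : List Char → List (List Char)
  | [] => [[]]
  | c :: cs =>
    match pySplit1 sep cs with
    | p :: ps => if c = sep then [] :: p :: ps else (c :: p) :: ps
    | [] => []   -- unreachable: pySplit1 never returns []

def altReplTab (c : Char) : Char := if c = '\t' then ' ' else c   -- .replace("\t", " ")
def altReplNl (c : Char) : Char := if c = '\n' then ' ' else c    -- .replace("\n", " ")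

-- the 'for piece in pieces[1:]' loop of Source B
def altInner : (List String × List Char) → List (List Char) → List String × List Char
  | (ret, cur), [] => (ret, cur)
  | (ret, cur), p :: ps =>
      altInner ((if cur ≠ [] then ret ++ [String.ofList cur] else ret), p) ps

-- the 'for part in text.split('"')' loop of Source B; pieces.headI/tail are pieces[0]/pieces[1:]
def altOuter : (List String × List Char) → Bool → List (List Char) → List String × List Char
  | (ret, cur), _, [] => (ret, cur)
  | (ret, cur), inside, part :: ps =>
    if inside then altOuter (ret, cur ++ part) (!inside) ps
    else
      let pieces := pySplit1 ' ' ((part.map altReplTab).map altReplNl)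
      altOuter (altInner (ret, cur ++ pieces.headI) pieces.tail) (!inside) ps

def shellsplit_alt (text : String) : List String :=
  let st := altOuter ([], []) false (pySplit1 '"' text.toList)
  if st.2 ≠ [] then st.1 ++ [String.ofList st.2] else st.1

-- ===== PRECONDITION & SPEC =====
def Spec_shellsplit (text : String) (out : List String) : Prop := out = shellsplit_alt text
instance (text : String) (out : List String) : Decidable (Spec_shellsplit text out) := by unfold Spec_shellsplit; infer_instance

-- ===== CLAIM (what is proved, stated in full; the proofs are below) =====
def Claim_equal_shellsplit : Prop := ∀ (text : String), Dom_shellsplit text → Spec_shellsplit text (shellsplit text)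

-- ===== LEMMAS AND PROOFS =====

theorem pySplit1_ex (sep : Char) (cs : List Char) : ∃ p ps, pySplit1 sep cs = p :: ps := by
  induction cs with
  | nil => exact ⟨[], [], rfl⟩
  | cons c cs ih =>
    obtain ⟨p, ps, h⟩ := ih
    by_cases hc : c = sep
    · exact ⟨[], p :: ps, by simp [pySplit1, h, hc]⟩
    · exact ⟨c :: p, ps, by simp [pySplit1, h, hc]⟩

theorem pySplit1_cons_sep (sep : Char) (cs : List Char) :
    pySplit1 sep (sep :: cs) = [] :: pySplit1 sep cs := by
  obtain ⟨p, ps, h⟩ := pySplit1_ex sep cs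
  simp [pySplit1, h]

theorem pySplit1_cons_ne (sep c : Char) (cs : List Char) (hc : c ≠ sep) :
    pySplit1 sep (c :: cs) = (c :: (pySplit1 sep cs).headI) :: (pySplit1 sep cs).tail := by
  obtain ⟨p, ps, h⟩ := pySplit1_ex sep cs
  simp [pySplit1, h, hc]

theorem main_lemma (cs : List Char) : ∀ (inq : Bool) (ret : List String) (cur : List Char),
    altOuter (ret, cur) inq (pySplit1 '"' cs)
      = ((cs.foldl shellsplitStep (ret, inq, cur)).1,
         (cs.foldl shellsplitStep (ret, inq, cur)).2.2) := by
  induction cs with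
  | nil =>
    intro inq ret cur
    cases inq <;> simp [pySplit1, altOuter, altInner]
  | cons c cs ih =>
    intro inq ret cur
    obtain ⟨p, ps, hps⟩ := pySplit1_ex '"' cs
    by_cases hc : c = '"'
    · subst hc
      have h2 : List.foldl shellsplitStep (ret, inq, cur) ('"' :: cs)
          = List.foldl shellsplitStep (ret, !inq, cur) cs := by
        simp [List.foldl, shellsplitStep]
      rw [pySplit1_cons_sep, h2, ← ih (!inq) ret cur, hps]
      cases inq <;> simp [altOuter, pySplit1, altInner]
    · cases inq
      · -- outside quotes
        by_cases hsep : c = '\t' ∨ c = '\n' ∨ c = ' '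
        · -- c is a separator: after the replaces it is a space, so it opens a new piece
          have hrep : altReplNl (altReplTab c) = ' ' := by
            rcases hsep with h | h | h <;> simp [altReplTab, altReplNl, h]
          obtain ⟨q0, qs, hq⟩ := pySplit1_ex ' ' (List.map (altReplNl ∘ altReplTab) p)
          have hp1 : pySplit1 ' ' (altReplNl (altReplTab c) :: List.map (altReplNl ∘ altReplTab) p)
              = [] :: q0 :: qs := by
            rw [hrep, pySplit1_cons_sep, hq]
          have hfold : List.foldl shellsplitStep (ret, false, cur) (c :: cs)
              = List.foldl shellsplitStep
                  ((if cur ≠ [] then ret ++ [String.ofList cur] else ret), false, []) cs := by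
            simp [List.foldl, shellsplitStep, hc, hsep]
          rw [hfold, ← ih false _ [], hps, pySplit1_cons_ne '"' c cs hc, hps]
          simp [altOuter, hp1, hq, altInner]
        · -- c is an ordinary character: it is glued onto the first piece
          have hrep : altReplNl (altReplTab c) = c := by
            push Not at hsep
            simp [altReplTab, altReplNl, hsep.1, hsep.2.1]
          obtain ⟨q0, qs, hq⟩ := pySplit1_ex ' ' (List.map (altReplNl ∘ altReplTab) p)
          have hp1 : pySplit1 ' ' (altReplNl (altReplTab c) :: List.map (altReplNl ∘ altReplTab) p)
              = (c :: q0) :: qs := by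
            rw [hrep, pySplit1_cons_ne ' ' c _ (fun h => hsep (Or.inr (Or.inr h))), hq]
            rfl
          have hfold : List.foldl shellsplitStep (ret, false, cur) (c :: cs)
              = List.foldl shellsplitStep (ret, false, cur ++ [c]) cs := by
            simp only [List.foldl, shellsplitStep]
            rw [if_neg hc, if_neg (by tauto)]
          rw [hfold, ← ih false ret (cur ++ [c]), hps, pySplit1_cons_ne '"' c cs hc, hps]
          simp [altOuter, hp1, hq, List.append_assoc]
      · -- inside quotes: the whole part is glued onto current
        have hfold : List.foldl shellsplitStep (ret, true, cur) (c :: cs)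
            = List.foldl shellsplitStep (ret, true, cur ++ [c]) cs := by
          simp [List.foldl, shellsplitStep, hc]
        rw [hfold, ← ih true ret (cur ++ [c]), hps, pySplit1_cons_ne '"' c cs hc, hps]
        simp [altOuter, List.append_assoc]

-- ===== VERDICT (by name: the statement is the Claim_ definition above) =====
theorem shellsplit_spec : Claim_equal_shellsplit := by
  intro text _
  unfold Spec_shellsplit shellsplit shellsplit_alt
  rw [main_lemma text.toList false [] []]
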